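-- pv_equiv track=rewrite | github.com/Joeydelarago/adventofcode2017 | python/advent_day_6.py | advent6_1
-- ===== SOURCE A (Python) =====
-- def find_largest(lst):
--     """ retrun the index of the largest number in a list, if there are two
--         return the first.
--     """
--     biggest = 0
--     for i in range(1, len(lst)):
--         if lst[i] > lst[biggest]:
--             biggest = i
--     return biggest
--
-- def advent6_1(lst):
--     seenlst = []
--     cycles = 0
--     while True:
--         cycles += 1
--         largest = find_largest(lst)
--         blocks = lst[largest]
--         lst[largest] = 0
--
--         index = largest + 1
--         for i in range(blocks):
--             index += 1
--             lst[index % len(lst) - 1] += 1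
--
--         if lst in seenlst:
--             break
--         else:
--             seenlst += [lst.copy()]
--
--     return cycles
-- ===== SOURCE B (Python) =====
-- def advent6_1(lst):
--     n = len(lst)
--     seen = set()
--     cycles = 0
--     while True:
--         cycles += 1
--         m = max(lst)
--         i = lst.index(m)
--         lst[i] = 0
--         if m > 0:
--             base, r = divmod(m, n)
--             for j in range(n):
--                 lst[j] += base
--             for j in range(r):
--                 lst[(i + 1 + j) % n] += 1
--         state = tuple(lst)
--         if state in seen:
--             break
--         seen.add(state)
--     return cycles
-- ===== Notes on version B (the rewrite author's own statement) =====
-- stated objective: alternative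
-- what changed: B replaces A's one-block-at-a-time redistribution walk by a single divmod pass (add blocks//n to every bank, +1 on the blocks%n banks after the chosen index, exploiting that A's (index%n)-1 target with Python negative indexing is exactly (largest+1+j)%n) and replaces A's linear scan of the seen-states list by a hash set of tuples; per-cycle cost drops from O(blocks + cycles*n) to O(n), though total runtime is dominated by the number of cycles.
-- outside the precondition, e.g. on advent6_1([]): A raises IndexError, B raises ValueError
import Mathlib
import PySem

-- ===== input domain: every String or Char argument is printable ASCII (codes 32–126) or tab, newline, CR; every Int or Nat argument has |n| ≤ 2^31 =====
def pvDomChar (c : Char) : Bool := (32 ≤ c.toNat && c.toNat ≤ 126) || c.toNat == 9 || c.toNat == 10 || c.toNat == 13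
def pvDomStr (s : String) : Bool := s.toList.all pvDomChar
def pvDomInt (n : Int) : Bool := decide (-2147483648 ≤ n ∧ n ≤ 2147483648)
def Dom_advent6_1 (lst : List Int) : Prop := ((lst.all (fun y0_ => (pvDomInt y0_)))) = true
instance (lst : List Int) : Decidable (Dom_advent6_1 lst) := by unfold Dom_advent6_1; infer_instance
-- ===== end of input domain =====

-- B redistributes the blocks with one divmod pass per cycle instead of A's one-block-at-a-time
-- walk, and keeps seen states in a hash set instead of scanning a list; both A and B mutate `lst`
-- in place in Python — the equivalence proved here is about the RETURN value (final states coincide too).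

-- ===== PORT A =====
-- find_largest: loop over range(1, len(lst)) keeping the first index of the maximum
def pvFindLargest (lst : List Int) : Int :=
  (PySem.List.pyRange 1 (lst.length : Int) 1).foldl
    (fun biggest i =>
      if PySem.List.pyGetD lst biggest 0 < PySem.List.pyGetD lst i 0 then i else biggest) 0

-- lst[t] += 1 with Python indexing (t may be -1 here)
def pvABump (l : List Int) (t : Int) : List Int :=
  PySem.List.pySetD l t (PySem.List.pyGetD l t 0 + 1)

-- one iteration of A's while-body acting on lst (cycles/seen handled by pvALoop)
def pvAStep (lst : List Int) : List Int :=
  let largest := pvFindLargest lst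
  let blocks := PySem.List.pyGetD lst largest 0
  let l1 := PySem.List.pySetD lst largest 0
  ((PySem.List.pyRange 0 blocks 1).foldl
    (fun st (_ : Int) =>
      (pvABump st.1 (PySem.Int.mod (st.2 + 1) (st.1.length : Int) - 1), st.2 + 1))
    (l1, largest + 1)).1

-- the 'while True' loop; fuel only makes it total (never exhausted on terminating runs)
def pvALoop : Nat → List Int → List (List Int) → Int → Int
  | 0, _, _, cycles => cycles
  | fuel+1, lst, seen, cycles =>
      let lst' := pvAStep lst
      if lst' ∈ seen then cycles + 1
      else pvALoop fuel lst' (seen ++ [lst']) (cycles + 1)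

def advent6_1 (lst : List Int) : Int := pvALoop 1099511627776 lst [] 0

-- ===== PORT B =====
-- one iteration of B's while-body: take the max, zero it, add blocks//n to every bank and
-- one extra block to the blocks%n banks after the chosen index
def pvBStep (lst : List Int) : List Int :=
  let n : Int := lst.length
  let m := (PySem.List.max? lst (fun x => x)).getD 0
  let i : Nat := (PySem.List.index? lst m).getD 0
  let l1 := lst.set i 0
  if 0 < m then
    let base := PySem.Int.floordiv m n
    let r := PySem.Int.mod m n
    let l2 := l1.map (· + base)
    (PySem.List.pyRange 0 r 1).foldl
      (fun s j =>
        PySem.List.pySetD s (PySem.Int.mod ((i : Int) + 1 + j) n)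
          (PySem.List.pyGetD s (PySem.Int.mod ((i : Int) + 1 + j) n) 0 + 1)) l2
  else l1

def pvBLoop : Nat → List Int → PySem.Set (List Int) → Int → Int
  | 0, _, _, cycles => cycles
  | fuel+1, lst, seen, cycles =>
      let lst' := pvBStep lst
      if PySem.Set.contains seen lst' then cycles + 1
      else pvBLoop fuel lst' (PySem.Set.add seen lst') (cycles + 1)

def advent6_1_alt (lst : List Int) : Int := pvBLoop 1099511627776 lst PySem.Set.empty 0

-- ===== PRECONDITION & SPEC =====
-- Pre_ excludes only the empty list, on which A raises IndexError (lst[0]) and B raises ValueError (max([])).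
def Pre_advent6_1 (lst : List Int) : Prop := lst ≠ []
instance (lst : List Int) : Decidable (Pre_advent6_1 lst) := by unfold Pre_advent6_1; infer_instance
def pvWitness_advent6_1 : List Int := [0, 2, 7, 0]

def Spec_advent6_1 (lst : List Int) (out : Int) : Prop := out = advent6_1_alt lst
instance (lst : List Int) (out : Int) : Decidable (Spec_advent6_1 lst out) := by unfold Spec_advent6_1; infer_instance

-- ===== CLAIM (what is proved, stated in full; the proofs are below) =====
def Claim_equal_advent6_1 : Prop := ∀ (lst : List Int), Dom_advent6_1 lst → Pre_advent6_1 lst → Spec_advent6_1 lst (advent6_1 lst)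

-- ===== LEMMAS AND PROOFS =====

-- bump at a (guaranteed in-range) Nat position: the common normal form of both inner loops
def pvBump (s : List Int) (p : Nat) : List Int := s.set p (s.getD p 0 + 1)

def pvBumps (s : List Int) (ps : List Nat) : List Int := ps.foldl pvBump s

theorem pvBumps_length (s : List Int) (ps : List Nat) : (pvBumps s ps).length = s.length := by
  induction ps generalizing s with
  | nil => rfl
  | cons p ps ih => simp [pvBumps, List.foldl_cons] at *; simp [ih, pvBump]

-- two lists agreeing in length and at every getD position are equal
theorem pvEq_of_getD {l1 l2 : List Int} (hlen : l1.length = l2.length)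
    (h : ∀ k, k < l1.length → l1.getD k 0 = l2.getD k 0) : l1 = l2 := by
  apply List.ext_getElem hlen
  intro k h1 h2
  rw [← List.getD_eq_getElem l1 0 h1, ← List.getD_eq_getElem l2 0 h2]
  exact h k h1

theorem pvBumps_getD (s : List Int) (ps : List Nat) (k : Nat) (hk : k < s.length)
    (hps : ∀ p ∈ ps, p < s.length) :
    (pvBumps s ps).getD k 0 = s.getD k 0 + (ps.count k : Int) := by
  induction ps generalizing s with
  | nil => simp [pvBumps]
  | cons p ps ih =>
    have hlen : (pvBump s p).length = s.length := by simp [pvBump]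
    have hk' : k < (pvBump s p).length := by omega
    have := ih (pvBump s p) (by omega) (by intro q hq; rw [hlen]; exact hps q (List.mem_cons_of_mem _ hq))
    simp only [pvBumps, List.foldl_cons] at *
    rw [this]
    have hp : p < s.length := hps p (List.mem_cons_self)
    have h1 : (pvBump s p).getD k 0 = s.getD k 0 + (if p = k then 1 else 0) := by
      rw [List.getD_eq_getElem _ _ hk', List.getD_eq_getElem _ _ hk]
      simp [pvBump, List.getElem_set]
      split
      · subst k; simp [List.getElem?_eq_getElem hp]
      · simp
    rw [h1, List.count_cons]
    push_cast
    by_cases hpk : p = k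
    · simp [hpk]; ring
    · simp [hpk]

-- A's Python-indexed bump at (x % n) - 1 is the Nat bump at (x-1) % n
theorem pvABump_eq (s : List Int) (x : Int) (hn : 0 < s.length) :
    pvABump s (PySem.Int.mod x (s.length : Int) - 1) = pvBump s ((x - 1) % (s.length : Int)).toNat := by
  have hn0 : (0:Int) < (s.length : Int) := by omega
  have hsub : (x - 1) % (s.length : Int) = (x % (s.length : Int) - 1) % (s.length : Int) := by
    conv_lhs => rw [show x - 1 = (x % (s.length : Int) - 1) + (s.length : Int) * (x / (s.length : Int)) by
      rw [Int.emod_def]; ring]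
    rw [Int.add_mul_emod_self_left]
  have he0 : 0 ≤ x % (s.length : Int) := Int.emod_nonneg x (by omega)
  have he1 : x % (s.length : Int) < (s.length : Int) := Int.emod_lt_of_pos x hn0
  rw [PySem.Int.mod_eq_emod_of_pos hn0]
  by_cases he : x % (s.length : Int) = 0
  · -- target index is -1: Python wraps to the last element
    have hlast : (x - 1) % (s.length : Int) = (s.length : Int) - 1 := by
      rw [hsub, he, show (0:Int) - 1 = ((s.length : Int) - 1) + (s.length : Int) * (-1) by ring,
        Int.add_mul_emod_self_left]
      exact Int.emod_eq_of_lt (by omega) (by omega)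
    have hidx : PySem.List.pyIdx? s.length (-1) = some (s.length - 1) := by
      simp [PySem.List.pyIdx?]
      exact List.ne_nil_of_length_pos hn
    have hget : PySem.List.pyGetD s (-1) 0 = s.getD (s.length - 1) 0 := by
      simp only [PySem.List.pyGetD, PySem.List.pyGet?, hidx, Option.bind_some]
      rw [List.getD_eq_getElem _ _ (by omega), List.getElem?_eq_getElem (by omega)]
      rfl
    rw [he, show (0:Int) - 1 = -1 by norm_num]
    simp only [pvABump, PySem.List.pySetD, PySem.List.pySet?, hidx, hlast]
    rw [hget]
    simp only [pvBump, Option.map_some, Option.getD_some]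
    have htn : ((s.length : Int) - 1).toNat = s.length - 1 := by omega
    rw [htn]
  · -- target index is x % n - 1 ≥ 0
    have ht0 : 0 ≤ x % (s.length : Int) - 1 := by omega
    have heq : (x - 1) % (s.length : Int) = x % (s.length : Int) - 1 := by
      rw [hsub]; exact Int.emod_eq_of_lt (by omega) (by omega)
    rw [pvABump, PySem.List.pySetD_of_nonneg _ _ ht0, PySem.List.pyGetD_of_nonneg _ _ ht0, heq, pvBump]

-- loop invariant of find_largest: first max of the scanned prefix
theorem pvFL_aux (lst : List Int) (u : Nat) (h1 : 1 ≤ u) : u ≤ lst.length →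
    ∃ j : Nat, ((PySem.List.pyRange 1 (u : Int) 1).foldl
        (fun biggest i =>
          if PySem.List.pyGetD lst biggest 0 < PySem.List.pyGetD lst i 0 then i else biggest) 0)
        = (j : Int) ∧ j < u ∧ (∀ t, t < u → lst.getD t 0 ≤ lst.getD j 0) ∧
          (∀ t, t < j → lst.getD t 0 < lst.getD j 0) := by
  induction u, h1 using Nat.le_induction with
  | base =>
    intro _
    refine ⟨0, ?_, by omega, ?_, by omega⟩
    · rw [PySem.List.pyRange_one_eq_nil (by norm_num)]; rfl
    · intro t ht; interval_cases t; exact le_refl _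
  | succ u hu1 ih =>
    intro hlen
    obtain ⟨j, hfold, hju, hmax, hfirst⟩ := ih (by omega)
    have hcast : ((u : Int) + 1) = ((u + 1 : Nat) : Int) := by push_cast; ring
    rw [← hcast, PySem.List.pyRange_one_succ_right (by exact_mod_cast hu1),
      List.foldl_append, hfold]
    simp only [List.foldl_cons, List.foldl_nil, PySem.List.pyGetD_natCast]
    by_cases hlt : lst.getD j 0 < lst.getD u 0
    · refine ⟨u, by rw [if_pos hlt], by omega, ?_, ?_⟩
      · intro t ht
        rcases Nat.lt_succ_iff_lt_or_eq.mp ht with h' | h'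
        · exact le_of_lt (lt_of_le_of_lt (hmax t h') hlt)
        · subst h'; exact le_refl _
      · intro t ht
        exact lt_of_le_of_lt (hmax t ht) hlt
    · refine ⟨j, by rw [if_neg hlt], by omega, ?_, hfirst⟩
      intro t ht
      rcases Nat.lt_succ_iff_lt_or_eq.mp ht with h' | h'
      · exact hmax t h'
      · subst h'; exact le_of_not_gt hlt

-- find_largest returns the first index of the maximum
theorem pvFindLargest_spec (lst : List Int) (h : lst ≠ []) :
    ∃ j : Nat, pvFindLargest lst = (j : Int) ∧ j < lst.length ∧
      (∀ t, t < lst.length → lst.getD t 0 ≤ lst.getD j 0) ∧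
      (∀ t, t < j → lst.getD t 0 < lst.getD j 0) := by
  have hlen : 1 ≤ lst.length := by
    cases lst with | nil => exact absurd rfl h | cons a l => simp
  obtain ⟨j, hfold, hj, hmax, hfirst⟩ := pvFL_aux lst lst.length hlen le_rfl
  exact ⟨j, hfold, hj, hmax, hfirst⟩

-- every j ∈ [0,n) hits each residue class exactly once
theorem pvCount_one_cycle (n : Nat) (hn : 0 < n) (a : Int) (k : Nat) (hk : k < n) :
    ((List.range n).map (fun j : Nat => ((a + (j:Int)) % (n : Int)).toNat)).count k = 1 := by
  have hnI : (0:Int) < (n:Int) := by exact_mod_cast hn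
  apply List.count_eq_one_of_mem
  · refine List.Nodup.map_on ?_ List.nodup_range
    intro x hx y hy hxy
    simp only [List.mem_range] at hx hy
    have hx0 : 0 ≤ (a + (x:Int)) % (n:Int) := Int.emod_nonneg _ (by omega)
    have hx1 : (a + (x:Int)) % (n:Int) < (n:Int) := Int.emod_lt_of_pos _ hnI
    have hy0 : 0 ≤ (a + (y:Int)) % (n:Int) := Int.emod_nonneg _ (by omega)
    have heq : (a + (x:Int)) % (n:Int) = (a + (y:Int)) % (n:Int) := by omega
    have hdvd : (n:Int) ∣ (x:Int) - (y:Int) := by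
      have h1 := Int.emod_eq_emod_iff_emod_sub_eq_zero.mp heq
      rw [show (a + (x:Int)) - (a + (y:Int)) = (x:Int) - (y:Int) by ring] at h1
      exact Int.dvd_of_emod_eq_zero h1
    have := Int.eq_zero_of_abs_lt_dvd hdvd (abs_lt.mpr ⟨by omega, by omega⟩)
    omega
  · simp only [List.mem_map, List.mem_range]
    refine ⟨(((k:Int) - a) % (n:Int)).toNat, ?_, ?_⟩
    · have h0 : 0 ≤ ((k:Int) - a) % (n:Int) := Int.emod_nonneg _ (by omega)
      have h1 : ((k:Int) - a) % (n:Int) < (n:Int) := Int.emod_lt_of_pos _ hnI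
      omega
    · have h0 : 0 ≤ ((k:Int) - a) % (n:Int) := Int.emod_nonneg _ (by omega)
      have hcast : ((((k:Int) - a) % (n:Int)).toNat : Int) = ((k:Int) - a) % (n:Int) := by omega
      rw [hcast, show a + ((k:Int) - a) % (n:Int)
            = (k:Int) + (n:Int) * (-(((k:Int) - a) / (n:Int))) by rw [Int.emod_def]; ring,
        Int.add_mul_emod_self_left, Int.emod_eq_of_lt (by omega) (by exact_mod_cast hk)]
      omega

-- periodic reduction of the residue count
theorem pvCount_period (n : Nat) (hn : 0 < n) (a : Int) (b : Nat) (k : Nat) (hk : k < n) :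
    ((List.range b).map (fun j : Nat => ((a + (j:Int)) % (n : Int)).toNat)).count k
      = b / n + ((List.range (b % n)).map (fun j : Nat => ((a + (j:Int)) % (n : Int)).toNat)).count k := by
  induction b using Nat.strong_induction_on with
  | _ b ih =>
    by_cases hb : b < n
    · rw [Nat.div_eq_of_lt hb, Nat.mod_eq_of_lt hb]
      omega
    · have hnb : n ≤ b := by omega
      obtain ⟨b', rfl⟩ : ∃ b', b = n + b' := ⟨b - n, by omega⟩
      rw [List.range_add, List.map_append, List.count_append, pvCount_one_cycle n hn a k hk]
      have hshift : ((List.range b').map (fun x => n + x)).map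
            (fun j : Nat => ((a + (j:Int)) % (n : Int)).toNat)
          = (List.range b').map (fun j : Nat => ((a + (j:Int)) % (n : Int)).toNat) := by
        rw [← List.comp_map]
        apply List.map_congr_left
        intro x _
        simp only [Function.comp_apply]
        congr 1
        rw [show a + ((n + x : Nat) : Int) = (a + (x:Nat)) + (n:Int) * 1 by push_cast; ring,
          Int.add_mul_emod_self_left]
      rw [hshift, ih b' (by omega), Nat.add_div_left b' hn, Nat.add_mod_left]
      omega

-- A's inner fold is pvBumps over the positions (c + j) % n
theorem pvAFold_eq (n : Nat) (hn : 0 < n) (b : Nat) (L : List Int) (hL : L.length = b)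
    (s : List Int) (hs : s.length = n) (c : Int) :
    (L.foldl (fun st (_ : Int) =>
        (pvABump st.1 (PySem.Int.mod (st.2 + 1) (st.1.length : Int) - 1), st.2 + 1)) (s, c))
      = (pvBumps s ((List.range b).map (fun j : Nat => ((c + (j:Int)) % (n : Int)).toNat)), c + b) := by
  induction L generalizing s c b with
  | nil =>
    rw [← hL]
    simp [pvBumps]
  | cons x L ih =>
    rw [← hL]
    simp only [List.foldl_cons, List.length_cons]
    have hb := pvABump_eq s (c + 1) (by omega)
    rw [show c + 1 - 1 = c by ring] at hb
    have hpair : (pvABump s (PySem.Int.mod (c + 1) ((s.length : Nat) : Int) - 1), c + 1)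
        = (pvBump s ((c % (n:Int)).toNat), c + 1) := by rw [hb, hs]
    rw [hpair, ih L.length rfl _ (by simp [pvBump, hs]) (c + 1)]
    rw [Prod.mk.injEq]
    constructor
    case _ =>
      rw [show L.length + 1 = 1 + L.length by omega, List.range_add, List.map_append]
      simp only [pvBumps, List.foldl_append]
      have h0 : (List.range 1).map (fun j : Nat => ((c + (j:Int)) % (n : Int)).toNat)
          = [(c % (n:Int)).toNat] := by
        simp
      rw [h0]
      have h1 : ((List.range L.length).map (fun x => 1 + x)).map
            (fun j : Nat => ((c + (j:Int)) % (n : Int)).toNat)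
          = (List.range L.length).map (fun j : Nat => ((c + 1 + (j:Int)) % (n : Int)).toNat) := by
        rw [← List.comp_map]
        apply List.map_congr_left
        intro y _
        simp only [Function.comp_apply]
        congr 2
        push_cast
        ring
      rw [h1]
      rfl
    case _ =>
      push_cast
      ring

-- B's inner fold is pvBumps over the positions (a + j) % n
theorem pvBFold_eq (n : Nat) (hn : 0 < n) (a : Int) (js : List Nat) (l : List Int) :
    ((js.map (fun j : Nat => (j : Int))).foldl
        (fun s j => PySem.List.pySetD s (PySem.Int.mod (a + j) (n : Int))
          (PySem.List.pyGetD s (PySem.Int.mod (a + j) (n : Int)) 0 + 1)) l)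
      = pvBumps l (js.map (fun j : Nat => ((a + (j:Int)) % (n : Int)).toNat)) := by
  have hnI : (0:Int) < (n:Int) := by exact_mod_cast hn
  induction js generalizing l with
  | nil => rfl
  | cons j js ih =>
    simp only [List.map_cons, List.foldl_cons, pvBumps]
    have h0 : 0 ≤ (a + (j:Int)) % (n:Int) := Int.emod_nonneg _ (by omega)
    rw [PySem.Int.mod_eq_emod_of_pos hnI, PySem.List.pySetD_of_nonneg _ _ h0,
      PySem.List.pyGetD_of_nonneg _ _ h0]
    exact ih _

-- divmod redistribution equals one-block-at-a-time redistribution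
theorem pvRedistribute_eq (n : Nat) (hn : 0 < n) (l : List Int) (hl : l.length = n)
    (a : Int) (m : Int) (hm : 0 < m) :
    pvBumps l ((List.range m.toNat).map (fun j : Nat => ((a + (j:Int)) % (n : Int)).toNat))
      = pvBumps (l.map (· + PySem.Int.floordiv m (n:Int)))
          ((List.range (m % (n:Int)).toNat).map (fun j : Nat => ((a + (j:Int)) % (n : Int)).toNat)) := by
  have hnI : (0:Int) < (n:Int) := by exact_mod_cast hn
  have h1 : ((m.toNat : Nat) : Int) = m := Int.toNat_of_nonneg (le_of_lt hm)
  have hfd : PySem.Int.floordiv m (n:Int) = ((m.toNat / n : Nat) : Int) := by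
    rw [PySem.Int.floordiv_eq_ediv_of_pos hnI, Int.natCast_div, h1]
  have hmd : (m % (n:Int)).toNat = m.toNat % n := by
    have h2 : ((m.toNat % n : Nat) : Int) = m % (n:Int) := by rw [Int.natCast_mod, h1]
    omega
  have hpos : ∀ p ∈ (List.range m.toNat).map (fun j : Nat => ((a + (j:Int)) % (n : Int)).toNat),
      p < n := by
    intro p hp
    simp only [List.mem_map, List.mem_range] at hp
    obtain ⟨j, _, rfl⟩ := hp
    have := Int.emod_lt_of_pos (a + (j:Int)) hnI
    have := Int.emod_nonneg (a + (j:Int)) (show (n:Int) ≠ 0 by omega)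
    omega
  have hpos' : ∀ p ∈ (List.range (m % (n:Int)).toNat).map
      (fun j : Nat => ((a + (j:Int)) % (n : Int)).toNat), p < n := by
    intro p hp
    simp only [List.mem_map, List.mem_range] at hp
    obtain ⟨j, _, rfl⟩ := hp
    have := Int.emod_lt_of_pos (a + (j:Int)) hnI
    have := Int.emod_nonneg (a + (j:Int)) (show (n:Int) ≠ 0 by omega)
    omega
  apply pvEq_of_getD
  · rw [pvBumps_length, pvBumps_length, List.length_map]
  · intro k hk
    rw [pvBumps_length, hl] at hk
    rw [pvBumps_getD _ _ k (by omega) (by rw [hl]; exact hpos),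
      pvBumps_getD _ _ k (by rw [List.length_map]; omega)
        (by rw [List.length_map, hl]; exact hpos'),
      pvCount_period n hn a m.toNat k hk, hmd]
    have hkl : k < l.length := by omega
    have hkm : k < (l.map (· + PySem.Int.floordiv m (n:Int))).length := by
      rw [List.length_map]; omega
    have hmap : (l.map (· + PySem.Int.floordiv m (n:Int))).getD k 0
        = l.getD k 0 + PySem.Int.floordiv m (n:Int) := by
      rw [List.getD_eq_getElem _ _ hkm, List.getElem_map, List.getD_eq_getElem _ _ hkl]
    rw [hmap, hfd]
    push_cast
    ring

-- one step of A equals one step of B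
theorem pvStep_eq (lst : List Int) (h : lst ≠ []) : pvAStep lst = pvBStep lst := by
  have hn : 0 < lst.length := List.length_pos_of_ne_nil h
  have hnI : (0:Int) < (lst.length : Int) := by exact_mod_cast hn
  obtain ⟨j, hfl, hj, hmax, hfirst⟩ := pvFindLargest_spec lst h
  obtain ⟨m0, hm0⟩ : ∃ m0, PySem.List.max? lst (fun x => x) = some m0 := by
    cases hc : PySem.List.max? lst (fun x => x) with
    | none => exact absurd ((PySem.List.max?_eq_none_iff _ _).mp hc) h
    | some m0 => exact ⟨m0, rfl⟩
  have hisMax := PySem.List.max?_isMax hm0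
  have hmem := PySem.List.max?_mem hm0
  obtain ⟨i0, hi0⟩ : ∃ i0, PySem.List.index? lst m0 = some i0 :=
    Option.isSome_iff_exists.mp ((PySem.List.index?_isSome_iff _ _).mpr hmem)
  obtain ⟨hi0lt, hi0val, hi0first⟩ := PySem.List.getElem_of_index?_eq_some hi0
  have hjm : lst.getD j 0 = m0 := by
    have h1 : lst.getD j 0 ≤ m0 := by
      have hm : lst.getD j 0 ∈ lst := by
        rw [List.getD_eq_getElem _ _ hj]; exact List.getElem_mem hj
      exact hisMax _ hm
    have h2 : m0 ≤ lst.getD j 0 := by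
      have := hmax i0 hi0lt
      rw [List.getD_eq_getElem _ _ hi0lt, hi0val] at this
      exact this
    omega
  have hji : i0 = j := by
    rcases lt_trichotomy j i0 with hlt | heq | hgt
    · exfalso
      apply hi0first j hlt
      rw [← List.getD_eq_getElem _ 0 hj]
      exact hjm
    · exact heq.symm
    · exfalso
      have := hfirst i0 hgt
      rw [List.getD_eq_getElem _ _ hi0lt, hi0val, ← hjm] at this
      omega
  subst hji
  simp only [pvAStep, pvBStep, hfl, hm0, hi0, Option.getD_some,
    PySem.List.pyGetD_natCast, PySem.List.pySetD_natCast, hjm]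
  by_cases hmpos : 0 < m0
  · rw [if_pos hmpos]
    have hlenA : (PySem.List.pyRange 0 m0 1).length = m0.toNat := by
      rw [PySem.List.length_pyRange_one]; norm_num
    have hsetlen : (lst.set i0 0).length = lst.length := List.length_set
    rw [pvAFold_eq lst.length hn m0.toNat (PySem.List.pyRange 0 m0 1) hlenA
      (lst.set i0 0) hsetlen ((i0 : Int) + 1)]
    have hr : PySem.Int.mod m0 ((lst.length : Nat) : Int) = m0 % (lst.length : Int) :=
      PySem.Int.mod_eq_emod_of_pos hnI
    rw [hr, PySem.List.pyRange_zero (m0 % (lst.length : Int)),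
      pvBFold_eq lst.length hn ((i0 : Int) + 1) (List.range (m0 % (lst.length : Int)).toNat)]
    exact pvRedistribute_eq lst.length hn (lst.set i0 0) hsetlen ((i0 : Int) + 1) m0 hmpos
  · rw [if_neg hmpos, PySem.List.pyRange_one_eq_nil (by omega)]
    rfl

-- B's inner fold preserves the length
theorem pvBFoldLen (L : List Int) (i0 : Nat) (nI : Int) (l : List Int) :
    (L.foldl (fun s j => PySem.List.pySetD s (PySem.Int.mod ((i0 : Int) + 1 + j) nI)
      (PySem.List.pyGetD s (PySem.Int.mod ((i0 : Int) + 1 + j) nI) 0 + 1)) l).length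
      = l.length := by
  induction L generalizing l with
  | nil => rfl
  | cons x L ih => rw [List.foldl_cons, ih, PySem.List.length_pySetD]

theorem pvBStep_length (lst : List Int) : (pvBStep lst).length = lst.length := by
  simp only [pvBStep]
  split
  · rw [pvBFoldLen, List.length_map, List.length_set]
  · rw [List.length_set]

theorem pvLoop_eq (fuel : Nat) (lst : List Int) (seen : List (List Int)) (cycles : Int)
    (h : lst ≠ []) : pvALoop fuel lst seen cycles = pvBLoop fuel lst seen cycles := by
  induction fuel generalizing lst seen cycles with
  | zero => rfl
  | succ fuel ih =>
    simp only [pvALoop, pvBLoop]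
    rw [pvStep_eq lst h]
    have hne : pvBStep lst ≠ [] := by
      have hlen := pvBStep_length lst
      intro hnil
      rw [hnil] at hlen
      simp only [List.length_nil] at hlen
      exact h (List.eq_nil_of_length_eq_zero hlen.symm)
    by_cases hmem : pvBStep lst ∈ seen
    · rw [if_pos hmem, if_pos ((PySem.Set.contains_iff _ _).mpr hmem)]
    · rw [if_neg hmem, if_neg (fun hc => hmem ((PySem.Set.contains_iff _ _).mp hc)),
        PySem.Set.add_of_not_mem hmem]
      exact ih _ _ _ hne

-- ===== VERDICT (by name: the statement is the Claim_ definition above) =====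
theorem advent6_1_spec : Claim_equal_advent6_1 := by
  intro lst _ hpre
  unfold Spec_advent6_1 advent6_1 advent6_1_alt
  exact pvLoop_eq _ lst [] 0 hpre
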